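-- pv_equiv track=rewrite | github.com/sin6708k/Algorithms | data_structures/max_heap.py | solution
-- ===== SOURCE A (Python) =====
-- from heapq import heappush, heappop
--
-- def solution(N: int, operations: list[int]):
--     heap = []
--     log = []
--
--     for operation in operations:
--         if operation != 0:
--             heappush(heap, -operation)
--         else:
--             log.append(-heappop(heap) if heap else 0)
--     return '\n'.join(map(str, log))
-- ===== SOURCE B (Python) =====
-- from bisect import insort
--
-- def solution(N: int, operations: list[int]):
--     lst = []   # kept in ascending sorted order; max is lst[-1]
--     log = []
--     for operation in operations:
--         if operation != 0:
--             insort(lst, operation)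
--         else:
--             log.append(lst.pop() if lst else 0)
--     return '\n'.join(map(str, log))
-- ===== Notes on version B (the rewrite author's own statement) =====
-- stated objective: alternative
-- what changed: Replaces the negated-values min-heap (heapq) by a plain list kept in ascending sorted order via bisect.insort, so a max-pop is simply lst.pop() of the last element and no negation trick is needed.
import Mathlib
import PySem

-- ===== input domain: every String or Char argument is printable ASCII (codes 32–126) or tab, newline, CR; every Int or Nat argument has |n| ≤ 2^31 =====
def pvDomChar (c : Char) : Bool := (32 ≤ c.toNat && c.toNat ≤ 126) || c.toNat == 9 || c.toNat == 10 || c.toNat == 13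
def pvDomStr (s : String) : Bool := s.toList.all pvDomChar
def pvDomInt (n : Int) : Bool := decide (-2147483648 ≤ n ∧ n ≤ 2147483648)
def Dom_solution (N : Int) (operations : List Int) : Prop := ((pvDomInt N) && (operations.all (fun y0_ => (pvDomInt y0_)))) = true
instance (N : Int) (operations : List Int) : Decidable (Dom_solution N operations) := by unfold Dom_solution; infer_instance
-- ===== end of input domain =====

-- B keeps an ascending sorted list (bisect.insort, pop the last element) instead of A's
-- negated-values min-heap (heapq); an alternative data structure, same return value.

-- ===== PORT A =====
-- heapq.heappush / heappop are stdlib calls with no PySem primitive; they are ported by their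
-- documented semantics on a list of ints (push a value; pop the smallest value): the heap list
-- holds the bag of pushed values, pop removes the first occurrence of the minimum. This is exact
-- for A's RETURN VALUE: only popped values reach the output, equal int keys are identical
-- values, and heapq pops a minimum, so the heap's internal array layout is unobservable here.
def pyHeappush (heap : List Int) (item : Int) : List Int := heap ++ [item]

def pyHeappop? (heap : List Int) : Option (Int × List Int) :=
  match PySem.List.min? heap (fun x => x) with
  | some m => some (m, (PySem.List.remove? heap m).getD heap)
  | none => none

-- one iteration of A's for-loop over (heap, log)
def solStepA (st : List Int × List Int) (operation : Int) : List Int × List Int :=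
  if operation ≠ 0 then (pyHeappush st.1 (-operation), st.2)
  else
    match pyHeappop? st.1 with
    | some (m, h) => (h, st.2 ++ [-m])
    | none => (st.1, st.2 ++ [0])

def solution (N : Int) (operations : List Int) : String :=
  PySem.Str.join "\n" ((operations.foldl solStepA ([], [])).2.map PySem.Int.toStr)

-- ===== PORT B =====
-- one iteration of B's for-loop over (lst, log); bisect.insort lst x = insert x at bisect_right
def solStepB (st : List Int × List Int) (operation : Int) : List Int × List Int :=
  if operation ≠ 0 then
    (PySem.List.insert st.1 (PySem.List.bisectRight st.1 operation) operation, st.2)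
  else
    match PySem.List.pop? st.1 with
    | some (m, rest) => (rest, st.2 ++ [m])
    | none => (st.1, st.2 ++ [0])

def solution_alt (N : Int) (operations : List Int) : String :=
  PySem.Str.join "\n" ((operations.foldl solStepB ([], [])).2.map PySem.Int.toStr)

-- ===== PRECONDITION & SPEC =====
def Spec_solution (N : Int) (operations : List Int) (out : String) : Prop := out = solution_alt N operations
instance (N : Int) (operations : List Int) (out : String) : Decidable (Spec_solution N operations out) := by unfold Spec_solution; infer_instance

-- ===== CLAIM (what is proved, stated in full; the proofs are below) =====
def Claim_equal_solution : Prop := ∀ (N : Int) (operations : List Int), Dom_solution N operations → Spec_solution N operations (solution N operations)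

-- ===== LEMMAS AND PROOFS =====

-- the coupling invariant: A's heap is (as a bag) the negation of B's list, and B's list is sorted
def CoupInv (heap lst : List Int) : Prop :=
  heap.Perm (lst.map (fun x => -x)) ∧ lst.Pairwise (· ≤ ·)

-- insort keeps the list sorted and inserts the value (as a bag)
lemma insort_perm_sorted (lst : List Int) (x : Int) (hs : lst.Pairwise (· ≤ ·)) :
    (PySem.List.insert lst (PySem.List.bisectRight lst x) x).Perm (x :: lst) ∧
    (PySem.List.insert lst (PySem.List.bisectRight lst x) x).Pairwise (· ≤ ·) := by
  obtain ⟨hle, hbefore, hafter⟩ := PySem.List.bisectRight_spec lst x hs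
  set p := PySem.List.bisectRight lst x with hp
  rw [PySem.List.insert_natCast lst p x hle]
  constructor
  · have h1 : (List.take p lst ++ x :: List.drop p lst).Perm
        (x :: (List.take p lst ++ List.drop p lst)) := List.perm_middle
    rwa [List.take_append_drop] at h1
  · rw [List.pairwise_append]
    refine ⟨List.Pairwise.sublist (List.take_sublist p lst) hs,
      List.Pairwise.cons ?_ (List.Pairwise.sublist (List.drop_sublist p lst) hs), ?_⟩
    · intro b hb
      rw [List.mem_drop_iff_getElem] at hb
      obtain ⟨j, hj, rfl⟩ := hb
      exact le_of_lt (hafter (p + j) (by omega) (by omega))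
    · intro a ha b hb
      rw [List.mem_take_iff_getElem] at ha
      obtain ⟨j, hj, rfl⟩ := ha
      have hax : lst[j] ≤ x := hbefore j (by omega) (by omega)
      rcases List.mem_cons.mp hb with rfl | hb
      · exact hax
      · rw [List.mem_drop_iff_getElem] at hb
        obtain ⟨k, hk, rfl⟩ := hb
        exact le_trans hax (le_of_lt (hafter (p + k) (by omega) (by omega)))

-- in a sorted list every element is ≤ the appended last element
lemma le_last_of_sorted (l : List Int) (a : Int) (hs : (l ++ [a]).Pairwise (· ≤ ·)) :
    ∀ b ∈ l ++ [a], b ≤ a := by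
  rw [List.pairwise_append] at hs
  intro b hb
  rcases List.mem_append.mp hb with hb | hb
  · exact hs.2.2 b hb a (List.mem_singleton_self a)
  · rw [List.mem_singleton] at hb; omega

-- A pops exactly the negated maximum, and the two states stay coupled
lemma pop_step (heap l : List Int) (a : Int) (hperm : heap.Perm ((l ++ [a]).map (fun x => -x)))
    (hs : (l ++ [a]).Pairwise (· ≤ ·)) :
    pyHeappop? heap = some (-a, heap.erase (-a)) ∧
    (heap.erase (-a)).Perm (l.map (fun x => -x)) := by
  have hmem : (-a) ∈ heap := by
    refine hperm.mem_iff.mpr ?_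
    exact List.mem_map.mpr ⟨a, by simp, rfl⟩
  have hne : heap ≠ [] := by intro h; subst h; simp at hmem
  obtain ⟨m, hm⟩ : ∃ m, PySem.List.min? heap (fun x => x) = some m := by
    cases h : PySem.List.min? heap (fun x => x) with
    | none => exact absurd ((PySem.List.min?_eq_none_iff _ _).mp h) hne
    | some m => exact ⟨m, rfl⟩
  have hmmem : m ∈ heap := PySem.List.min?_mem hm
  have hmin : ∀ y ∈ heap, m ≤ y := PySem.List.min?_isMin hm
  -- m = -a : m is some -b with b ∈ l ++ [a], b ≤ a, and m ≤ -a
  have hma : m = -a := by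
    obtain ⟨b, hb, hmb⟩ := List.mem_map.mp (hperm.mem_iff.mp hmmem)
    have hba : b ≤ a := le_last_of_sorted l a hs b hb
    have h1 : m ≤ -a := hmin _ hmem
    omega
  subst hma
  have hrem : PySem.List.remove? heap (-a) = some (heap.erase (-a)) :=
    PySem.List.remove?_eq_some_erase heap (-a) hmem
  refine ⟨by unfold pyHeappop?; rw [hm]; simp [hrem], ?_⟩
  have he : ((l ++ [a]).map (fun x => -x)) = (l.map (fun x => -x)) ++ [-a] := by simp
  rw [he] at hperm
  have h2 : ((l.map (fun x => -x)) ++ [-a]).Perm ((-a) :: l.map (fun x => -x)) :=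
    List.perm_append_singleton _ _
  have h4 := (hperm.erase (-a)).trans (h2.erase (-a))
  rwa [List.erase_cons_head] at h4

-- the two loops produce the same log from coupled states
lemma loop_eq : ∀ (ops heap lst log : List Int), CoupInv heap lst →
    (ops.foldl solStepA (heap, log)).2 = (ops.foldl solStepB (lst, log)).2 := by
  intro ops
  induction ops with
  | nil => intro heap lst log _; rfl
  | cons op rest ih =>
    intro heap lst log hinv
    obtain ⟨hperm, hs⟩ := hinv
    by_cases hop : op ≠ 0
    · simp only [List.foldl_cons, solStepA, solStepB, if_pos hop]
      obtain ⟨hp, hsort⟩ := insort_perm_sorted lst op hs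
      refine ih _ _ _ ⟨?_, hsort⟩
      have hh : (pyHeappush heap (-op)).Perm ((-op) :: lst.map (fun x => -x)) :=
        (List.perm_append_singleton _ _).trans (hperm.cons (-op))
      have h5 : ((PySem.List.insert lst (PySem.List.bisectRight lst op) op).map
          (fun x => -x)).Perm ((-op) :: lst.map (fun x => -x)) := by
        simpa using hp.map (fun x => -x)
      exact hh.trans h5.symm
    · rw [not_ne_iff] at hop; subst hop
      rcases List.eq_nil_or_concat lst with rfl | ⟨l, a, rfl⟩
      · have hheap : heap = [] := by simpa using hperm.eq_nil
        subst hheap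
        simp only [List.foldl_cons, solStepA, solStepB]
        norm_num [pyHeappop?, PySem.List.min?, PySem.List.pop?]
        exact ih [] [] (log ++ [0]) ⟨List.Perm.refl _, List.Pairwise.nil⟩
      · rw [List.concat_eq_append] at *
        obtain ⟨hpop, hperm'⟩ := pop_step heap l a hperm hs
        simp only [List.foldl_cons, solStepA, solStepB]
        norm_num [hpop, PySem.List.pop?_last]
        refine ih _ _ _ ⟨hperm', List.Pairwise.sublist (List.sublist_append_left l [a]) hs⟩

-- ===== VERDICT (by name: the statement is the Claim_ definition above) =====
theorem solution_spec : Claim_equal_solution := by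
  intro N operations _
  unfold Spec_solution solution solution_alt
  rw [loop_eq operations [] [] [] ⟨List.Perm.refl _, List.Pairwise.nil⟩]
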